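-- pv_equiv track=rewrite | github.com/scmmishra/Euler | 5_SmallestMultiple.py | factor_append
-- ===== SOURCE A (Python) =====
-- def factors(n):
--     factors = []
--     while n % 2 == 0:
--         factors.append(2)
--         n = n/2
--     p = 3
--     while n != 1:
--         while n % p == 0:
--             factors.append(p)
--             n = n/p
--         p += 2
--     return factors
--
-- def factor_append(factors,new):
--     if len(factors) == 0: return new
--     for i in range(len(new)):
--         if i > 0 and new[i] == new[i-1]: continue
--         new_count = new.count(new[i])
--         old_count = factors.count(new[i])
--         if new_count > old_count:
--             for j in range(new_count - old_count): factors.append(new[i])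
--     factors.sort()
--     return factors
-- ===== SOURCE B (Python) =====
-- def factor_append(factors, new):
--     # Two-pointer merge of the two sorted lists, keeping max multiplicity per value.
--     # Like A: mutates `factors` in place (unless it is empty) and returns it.
--     if len(factors) == 0:
--         return new
--     a = sorted(factors)
--     b = sorted(new)
--     out = []
--     i = j = 0
--     while i < len(a) and j < len(b):
--         if a[i] < b[j]:
--             out.append(a[i]); i += 1
--         elif b[j] < a[i]:
--             out.append(b[j]); j += 1
--         else:
--             out.append(a[i]); i += 1; j += 1
--     out.extend(a[i:])
--     out.extend(b[j:])
--     factors[:] = out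
--     return factors
-- ===== Notes on version B (the rewrite author's own statement) =====
-- stated objective: faster
-- what changed: Replaced the per-element count() rescans of both lists with a single two-pointer merge of the two sorted copies that keeps the max multiplicity per value.
import Mathlib
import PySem

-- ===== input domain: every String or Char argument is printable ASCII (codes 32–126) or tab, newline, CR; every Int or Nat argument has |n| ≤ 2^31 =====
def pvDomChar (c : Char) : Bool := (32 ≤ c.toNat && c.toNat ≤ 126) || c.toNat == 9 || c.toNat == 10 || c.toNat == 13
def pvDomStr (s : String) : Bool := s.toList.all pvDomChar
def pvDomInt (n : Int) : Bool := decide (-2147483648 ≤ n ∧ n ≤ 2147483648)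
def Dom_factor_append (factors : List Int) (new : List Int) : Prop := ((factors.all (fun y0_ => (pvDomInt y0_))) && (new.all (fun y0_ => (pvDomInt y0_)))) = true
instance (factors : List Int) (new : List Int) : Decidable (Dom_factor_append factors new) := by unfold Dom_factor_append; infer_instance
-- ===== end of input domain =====

-- B replaces A's per-element count() rescans with a single two-pointer merge of the two sorted
-- copies, keeping the max multiplicity per value. Both Pythons mutate `factors` in place (when it is
-- non-empty) and return it; B performs the same in-place update (factors[:] = out), and the
-- equivalence proved here is about the RETURN value.

-- ===== PORT A =====
-- loop body of `for i in range(len(new))`; the indices i and i-1 (the latter read only when 0 < i)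
-- are always in range, so getD's default 0 is never used and getD is exact there.
def stepA (new : List Int) (f : List Int) (i : Nat) : List Int :=
  if 0 < i ∧ new.getD i 0 = new.getD (i - 1) 0 then f
  else
    let c := new.getD i 0
    let new_count := PySem.List.count new c
    let old_count := PySem.List.count f c
    if new_count > old_count then
      (List.range (new_count - old_count)).foldl (fun f _ => f ++ [c]) f
    else f

def factor_append (factors : List Int) (new : List Int) : List Int :=
  if factors.length = 0 then new
  else
    PySem.List.sorted ((List.range new.length).foldl (stepA new) factors) (fun x => x) false


-- ===== PORT B =====
-- the two-pointer while loop of Source B together with its two tail-extends (the xs-[] / []-ys cases)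
def mergeMax : List Int → List Int → List Int
  | [], ys => ys
  | x :: xs, [] => x :: xs
  | x :: xs, y :: ys =>
    if x < y then x :: mergeMax xs (y :: ys)
    else if y < x then y :: mergeMax (x :: xs) ys
    else x :: mergeMax xs ys
termination_by xs ys => xs.length + ys.length

def factor_append_alt (factors : List Int) (new : List Int) : List Int :=
  if factors.length = 0 then new
  else
    mergeMax (PySem.List.sorted factors (fun x => x) false)
             (PySem.List.sorted new (fun x => x) false)


-- ===== PRECONDITION & SPEC =====
def Spec_factor_append (factors : List Int) (new : List Int) (out : List Int) : Prop := out = factor_append_alt factors new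
instance (factors : List Int) (new : List Int) (out : List Int) : Decidable (Spec_factor_append factors new out) := by unfold Spec_factor_append; infer_instance

-- ===== CLAIM (what is proved, stated in full; the proofs are below) =====
def Claim_equal_factor_append : Prop := ∀ (factors : List Int) (new : List Int), Dom_factor_append factors new → Spec_factor_append factors new (factor_append factors new)

-- ===== LEMMAS AND PROOFS =====
theorem mem_mergeMax {xs ys : List Int} {v : Int} (h : v ∈ mergeMax xs ys) : v ∈ xs ∨ v ∈ ys := by
  fun_induction mergeMax xs ys <;> simp_all <;> tauto
theorem pairwise_mergeMax {xs ys : List Int} (hx : xs.Pairwise (· ≤ ·)) (hy : ys.Pairwise (· ≤ ·)) :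
    (mergeMax xs ys).Pairwise (· ≤ ·) := by
  fun_induction mergeMax xs ys with
  | case1 ys => exact hy
  | case2 x xs => exact hx
  | case3 x xs y ys hlt ih =>
    rw [List.pairwise_cons] at hx
    refine List.pairwise_cons.2 ⟨?_, ih hx.2 hy⟩
    intro z hz
    rcases mem_mergeMax hz with h | h
    · exact hx.1 z h
    · rcases List.mem_cons.1 h with rfl | h
      · exact le_of_lt hlt
      · exact le_of_lt (lt_of_lt_of_le hlt ((List.pairwise_cons.1 hy).1 z h))
  | case4 x xs y ys h1 hlt ih =>
    rw [List.pairwise_cons] at hy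
    refine List.pairwise_cons.2 ⟨?_, ih hx hy.2⟩
    intro z hz
    rcases mem_mergeMax hz with h | h
    · rcases List.mem_cons.1 h with rfl | h
      · exact le_of_lt hlt
      · exact le_of_lt (lt_of_lt_of_le hlt ((List.pairwise_cons.1 hx).1 z h))
    · exact hy.1 z h
  | case5 x xs y ys h1 h2 ih =>
    have hxy : x = y := le_antisymm (le_of_not_gt h2) (le_of_not_gt h1)
    rw [List.pairwise_cons] at hx hy
    refine List.pairwise_cons.2 ⟨?_, ih hx.2 hy.2⟩
    intro z hz
    rcases mem_mergeMax hz with h | h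
    · exact hx.1 z h
    · exact hxy ▸ hy.1 z h

theorem count_mergeMax {xs ys : List Int} (hx : xs.Pairwise (· ≤ ·)) (hy : ys.Pairwise (· ≤ ·)) (v : Int) :
    (mergeMax xs ys).count v = max (xs.count v) (ys.count v) := by
  fun_induction mergeMax xs ys with
  | case1 ys => simp
  | case2 x xs => simp
  | case3 x xs y ys hlt ih =>
    rw [List.pairwise_cons] at hx
    have := ih hx.2 hy
    by_cases hv : v = x
    · subst hv
      have hnot : v ∉ y :: ys := by
        intro hm
        rcases List.mem_cons.1 hm with rfl | hm
        · exact absurd hlt (lt_irrefl _)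
        · exact absurd (lt_of_lt_of_le hlt ((List.pairwise_cons.1 hy).1 v hm)) (lt_irrefl _)
      simp [this, List.count_eq_zero.2 hnot]
    · simp [List.count_cons, this, Ne.symm hv]
  | case4 x xs y ys h1 hlt ih =>
    rw [List.pairwise_cons] at hy
    have := ih hx hy.2
    by_cases hv : v = y
    · subst hv
      have hnot : v ∉ x :: xs := by
        intro hm
        rcases List.mem_cons.1 hm with rfl | hm
        · exact absurd hlt (lt_irrefl _)
        · exact absurd (lt_of_lt_of_le hlt ((List.pairwise_cons.1 hx).1 v hm)) (lt_irrefl _)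
      simp [this, List.count_eq_zero.2 hnot]
    · simp [List.count_cons, this, Ne.symm hv]
  | case5 x xs y ys h1 h2 ih =>
    have hxy : x = y := le_antisymm (le_of_not_gt h2) (le_of_not_gt h1)
    subst hxy
    rw [List.pairwise_cons] at hx hy
    have := ih hx.2 hy.2
    by_cases hv : v = x
    · subst hv
      simp [this]
    · simp [this, Ne.symm hv]
theorem foldl_app_const (k : Nat) (f : List Int) (c : Int) :
    (List.range k).foldl (fun f _ => f ++ [c]) f = f ++ List.replicate k c := by
  induction k generalizing f with
  | zero => simp
  | succ n ih => rw [List.range_succ, List.foldl_append]; simp [ih, List.replicate_succ']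

theorem loopA_count (new f0 : List Int) (n : Nat) (hn : n ≤ new.length) :
    ∀ v : Int, ((List.range n).foldl (stepA new) f0).count v =
      if v ∈ new.take n then max (f0.count v) (new.count v) else f0.count v := by
  induction n with
  | zero => simp
  | succ n ih =>
    have hlt : n < new.length := hn
    have ih' := ih (le_of_lt hlt)
    intro v
    rw [List.range_succ, List.foldl_append]
    set g := (List.range n).foldl (stepA new) f0 with hg
    have hget : new.getD n 0 = new[n] := List.getD_eq_getElem new 0 hlt
    have htake : new.take (n+1) = new.take n ++ [new[n]] := by
      rw [List.take_add_one]; simp [List.getElem?_eq_getElem hlt]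
    have hmem1 : ∀ w : Int, w ∈ new.take (n+1) ↔ (w ∈ new.take n ∨ w = new[n]) := by
      intro w; rw [htake, List.mem_append, List.mem_singleton]
    simp only [List.foldl_cons, List.foldl_nil]
    unfold stepA
    by_cases hskip : 0 < n ∧ new.getD n 0 = new.getD (n-1) 0
    · -- `continue`: new[n] already occurs at index n-1, hence in take n
      rw [if_pos hskip]
      have hmemn : new[n] ∈ new.take n := by
        have h2 : new.getD (n-1) 0 = new[n-1] := List.getD_eq_getElem new 0 (by omega)
        have heq : new[n] = new[n-1] := by rw [← hget, ← h2, hskip.2]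
        rw [heq]
        have hl : n - 1 < (new.take n).length := by simp [List.length_take]; omega
        have := List.getElem_mem hl
        rwa [List.getElem_take] at this
      rw [ih' v]
      by_cases hv2 : v ∈ new.take n
      · simp [hmem1, hv2]
      · have hnot : ¬ v ∈ new.take (n+1) := by
          rw [hmem1]; rintro (h | h)
          · exact hv2 h
          · exact hv2 (h ▸ hmemn)
        simp [hv2, hnot]
    · rw [if_neg hskip]
      simp only [hget, PySem.List.count_eq]
      by_cases hin : new[n] ∈ new.take n
      · -- value already processed earlier: count is already the max, no append
        have hc := ih' new[n]; rw [if_pos hin] at hc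
        rw [if_neg (by omega : ¬ List.count new[n] new > List.count new[n] g)]
        rw [ih' v]
        by_cases hv2 : v ∈ new.take n
        · simp [hmem1, hv2]
        · by_cases hveq : v = new[n]
          · exact absurd (hveq ▸ hin) hv2
          · have hnot : ¬ v ∈ new.take (n+1) := by rw [hmem1]; tauto
            simp [hv2, hnot]
      · have hc := ih' new[n]; rw [if_neg hin] at hc
        by_cases hbig : List.count new[n] new > List.count new[n] g
        · rw [if_pos hbig, foldl_app_const, List.count_append, List.count_replicate, ih' v]
          by_cases hveq : v = new[n]
          · subst hveq
            have h1 : new[n] ∈ new.take (n+1) := (hmem1 new[n]).2 (Or.inr rfl)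
            simp [hin, h1]
            omega
          · by_cases hv2 : v ∈ new.take n
            · have h1 : v ∈ new.take (n+1) := (hmem1 v).2 (Or.inl hv2)
              simp [hv2, h1, Ne.symm hveq]
            · have h1 : ¬ v ∈ new.take (n+1) := by rw [hmem1]; tauto
              simp [hv2, h1, Ne.symm hveq]
        · rw [if_neg hbig, ih' v]
          by_cases hveq : v = new[n]
          · subst hveq
            have h1 : new[n] ∈ new.take (n+1) := (hmem1 new[n]).2 (Or.inr rfl)
            simp [hin, h1]
            omega
          · by_cases hv2 : v ∈ new.take n
            · have h1 : v ∈ new.take (n+1) := (hmem1 v).2 (Or.inl hv2)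
              simp [hv2, h1]
            · have h1 : ¬ v ∈ new.take (n+1) := by rw [hmem1]; tauto
              simp [hv2, h1]

theorem factor_append_eq_alt (factors new : List Int) : factor_append factors new = factor_append_alt factors new := by
  unfold factor_append factor_append_alt
  by_cases h0 : factors.length = 0
  · simp [h0]
  · rw [if_neg h0, if_neg h0]
    set fA := (List.range new.length).foldl (stepA new) factors with hfA
    set sf := PySem.List.sorted factors (fun x => x) false with hsf
    set sn := PySem.List.sorted new (fun x => x) false with hsn
    have hpf : sf.Pairwise (· ≤ ·) := PySem.List.sorted_pairwise factors (fun x => x)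
    have hpn : sn.Pairwise (· ≤ ·) := PySem.List.sorted_pairwise new (fun x => x)
    have hcount : ∀ v : Int, (PySem.List.sorted fA (fun x => x) false).count v = (mergeMax sf sn).count v := by
      intro v
      rw [count_mergeMax hpf hpn v]
      rw [(PySem.List.sorted_perm fA (fun x => x) false).count_eq]
      rw [(PySem.List.sorted_perm factors (fun x => x) false).count_eq]
      rw [(PySem.List.sorted_perm new (fun x => x) false).count_eq]
      rw [loopA_count new factors new.length le_rfl v, List.take_length]
      by_cases hv : v ∈ new
      · simp [hv]
      · simp [hv, List.count_eq_zero.2 hv]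
    exact (List.perm_iff_count.2 (fun a => hcount a)).eq_of_pairwise
      (fun a b _ _ h1 h2 => le_antisymm h1 h2)
      (PySem.List.sorted_pairwise fA (fun x => x)) (pairwise_mergeMax hpf hpn)

-- ===== VERDICT (by name: the statement is the Claim_ definition above) =====
theorem factor_append_spec : Claim_equal_factor_append := by
  intro factors new _
  unfold Spec_factor_append
  exact factor_append_eq_alt factors new
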